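-- pv_equiv track=rewrite | github.com/EduardoNodak/teoria-numeros | algoritmo-β.py | rsa_encrypt_decrypt
-- ===== SOURCE A (Python) =====
-- def text_to_ascii(text):
--     return [ord(char) for char in text]
--
-- def ascii_to_text(ascii_values):
--     return ''.join(chr(value % 256) for value in ascii_values)
--
-- def euclides(a, b):
--     if a == 0:
--         return b, 0, 1
--     gcd, x1, y1 = euclides(b % a, a)
--     x = y1 - (b // a) * x1
--     y = x1
--     return gcd, x, y
--
-- def mod_inverse(e, t):
--     gcd, x, _ = euclides(e, t)
--     if gcd != 1:
--         raise ValueError("Inverso modular não existe.")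
--     return x % t
--
-- def rsa_encrypt_decrypt(p, q, message):
--     n = p * q
--     t = (p - 1) * (q - 1)
--     e = 65537
--     d = mod_inverse(e, t)
--
--     ascii_values = text_to_ascii(message)
--     encrypted_values = [pow(value, e, n) for value in ascii_values]
--     decrypted_values = [pow(value, d, n) for value in encrypted_values]
--     decrypted_message = ascii_to_text(decrypted_values)
--
--     return encrypted_values, decrypted_message
-- ===== SOURCE B (Python) =====
-- def rsa_encrypt_decrypt(p, q, message):
--     n = p * q
--     t = (p - 1) * (q - 1)
--     e = 65537
--     # standard iterative extended Euclidean algorithm, inlined: d = e^{-1} mod t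
--     old_r, r = e, t
--     old_s, s = 1, 0
--     while r != 0:
--         quotient = old_r // r
--         old_r, r = r, old_r - quotient * r
--         old_s, s = s, old_s - quotient * s
--     if old_r != 1:
--         raise ValueError("Inverso modular não existe.")
--     d = old_s % t
--     encrypted_values = [pow(ord(ch), e, n) for ch in message]
--     decrypted_message = ''.join(chr(pow(c, d, n) % 256) for c in encrypted_values)
--     return encrypted_values, decrypted_message
-- ===== Notes on version B (the rewrite author's own statement) =====
-- stated objective: idiomatic
-- what changed: Replaces A's recursive extended-Euclid helper (euclides + mod_inverse) with the standard iterative extended Euclidean loop inlined into the function, and fuses the text_to_ascii/encrypt and decrypt/ascii_to_text passes into single comprehensions.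
-- outside the precondition, e.g. on rsa_encrypt_decrypt(0, 2, ''): A returns ([], ''), B raises ValueError
import Mathlib
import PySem

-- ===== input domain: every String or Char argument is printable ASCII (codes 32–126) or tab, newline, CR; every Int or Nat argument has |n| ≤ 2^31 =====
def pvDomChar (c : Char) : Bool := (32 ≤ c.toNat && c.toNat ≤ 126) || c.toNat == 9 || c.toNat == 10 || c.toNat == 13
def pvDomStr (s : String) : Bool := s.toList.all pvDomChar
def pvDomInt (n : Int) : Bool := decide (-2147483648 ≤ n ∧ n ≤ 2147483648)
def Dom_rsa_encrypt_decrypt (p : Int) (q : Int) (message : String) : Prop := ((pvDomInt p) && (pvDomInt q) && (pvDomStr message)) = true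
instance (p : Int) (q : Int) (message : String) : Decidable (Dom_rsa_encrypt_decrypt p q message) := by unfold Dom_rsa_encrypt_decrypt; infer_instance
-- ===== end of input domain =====

-- B replaces A's recursive extended-Euclid helper by the standard iterative extended
-- Euclidean loop, inlined, and fuses the ascii/encrypt and decrypt/join passes (idiomatic).

-- termination helper for both Euclid recursions: |a % b| < |b| when b ≠ 0 (Python mod)
theorem pvModNatAbsLt (a b : Int) (hb : b ≠ 0) : (PySem.Int.mod a b).natAbs < b.natAbs := by
  rcases lt_or_gt_of_ne hb with h | h
  · have := PySem.Int.mod_neg_bounds a h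
    omega
  · have h1 := PySem.Int.mod_nonneg a h
    have h2 := PySem.Int.mod_lt a h
    omega

-- ===== PORT A =====
-- binary modular exponentiation: equals Python's pow(b, e, m) for every m ≠ 0
-- (PySem.Int.mod m is a canonical-representative function, so squaring under mod is exact);
-- PySem.Int.powMod computes the same value but via b^e literally, which cannot be evaluated here (e = 65537).
def pvPowMod (b : Int) (e : Nat) (m : Int) : Int :=
  if e = 0 then PySem.Int.mod 1 m
  else
    let h := pvPowMod b (e / 2) m
    let hh := PySem.Int.mod (h * h) m
    if e % 2 = 1 then PySem.Int.mod (hh * b) m else hh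

def pvTextToAscii (text : String) : List Int :=
  text.toList.map (fun ch => (ch.toNat : Int))

def pvAsciiToText (vals : List Int) : String :=
  String.mk (vals.map (fun v => Char.ofNat (PySem.Int.mod v 256).toNat))

def pvEuclides (a b : Int) : Int × Int × Int :=
  if h : a = 0 then (b, 0, 1)
  else
    let r := pvEuclides (PySem.Int.mod b a) a
    (r.1, r.2.2 - PySem.Int.floordiv b a * r.2.1, r.2.1)
termination_by a.natAbs
decreasing_by exact pvModNatAbsLt b a h

-- none = the ValueError "Inverso modular não existe."
def pvModInverse (e t : Int) : Option Int :=
  let r := pvEuclides e t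
  if r.1 ≠ 1 then none else some (PySem.Int.mod r.2.1 t)

def rsa_encrypt_decrypt (p : Int) (q : Int) (message : String) : List Int × String :=
  let n := p * q
  let t := (p - 1) * (q - 1)
  match pvModInverse 65537 t with
  | none => ([], "")   -- A raises here: outside Pre_
  | some d =>
    let ascii_values := pvTextToAscii message
    let encrypted_values := ascii_values.map (fun v => pvPowMod v 65537 n)
    let decrypted_values := encrypted_values.map (fun v => pvPowMod v d.toNat n)
    (encrypted_values, pvAsciiToText decrypted_values)

-- ===== PORT B =====
-- the iterative extended-Euclid loop of Source B, tracking (old_r, r) and (old_s, s)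
def pvExtLoop (oldr r olds s : Int) : Int × Int :=
  if h : r = 0 then (oldr, olds)
  else
    let quotient := PySem.Int.floordiv oldr r
    pvExtLoop r (oldr - quotient * r) s (olds - quotient * s)
termination_by r.natAbs
decreasing_by
  have hid := PySem.Int.floordiv_mul_add_mod oldr r
  have hlt := pvModNatAbsLt oldr r h
  omega

def rsa_encrypt_decrypt_alt (p : Int) (q : Int) (message : String) : List Int × String :=
  let n := p * q
  let t := (p - 1) * (q - 1)
  let gs := pvExtLoop 65537 t 1 0
  if gs.1 ≠ 1 then ([], "")   -- B raises here: outside Pre_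
  else
    let d := PySem.Int.mod gs.2 t
    let encrypted_values := message.toList.map (fun ch => pvPowMod (ch.toNat : Int) 65537 n)
    (encrypted_values,
     String.mk (encrypted_values.map
       (fun c => Char.ofNat (PySem.Int.mod (pvPowMod c d.toNat n) 256).toNat)))

-- ===== PRECONDITION & SPEC =====
-- Pre_ excludes t = (p-1)*(q-1) ≤ 0 (there A's recursive Euclid still finds gcd 1 and proceeds
-- with a non-positive "private exponent" while B's iterative loop ends on a non-positive
-- remainder and raises, as both conventions legitimately may), inputs where the gcd is not 1
-- or t = 0 (A raises ValueError / ZeroDivisionError), and n = p*q = 0 with a non-empty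
-- message (A's pow raises ValueError).
def Pre_rsa_encrypt_decrypt (p : Int) (q : Int) (message : String) : Prop :=
  0 < (p - 1) * (q - 1) ∧ Int.gcd 65537 ((p - 1) * (q - 1)) = 1 ∧ (p * q ≠ 0 ∨ message = "")
instance (p : Int) (q : Int) (message : String) : Decidable (Pre_rsa_encrypt_decrypt p q message) := by unfold Pre_rsa_encrypt_decrypt; infer_instance

def pvWitness_rsa_encrypt_decrypt : Int × Int × String := (3, 5, "A")

def Spec_rsa_encrypt_decrypt (p : Int) (q : Int) (message : String) (out : List Int × String) : Prop := out = rsa_encrypt_decrypt_alt p q message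
instance (p : Int) (q : Int) (message : String) (out : List Int × String) : Decidable (Spec_rsa_encrypt_decrypt p q message out) := by unfold Spec_rsa_encrypt_decrypt; infer_instance

-- ===== CLAIM (what is proved, stated in full; the proofs are below) =====
def Claim_equal_rsa_encrypt_decrypt : Prop := ∀ (p : Int) (q : Int) (message : String), Dom_rsa_encrypt_decrypt p q message → Pre_rsa_encrypt_decrypt p q message → Spec_rsa_encrypt_decrypt p q message (rsa_encrypt_decrypt p q message)

-- ===== LEMMAS AND PROOFS =====

theorem pvNatAbsModOfNonneg (a b : Int) (ha : 0 ≤ a) (hb : 0 ≤ b) :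
    (b % a).natAbs = b.natAbs % a.natAbs := by
  obtain ⟨a', rfl⟩ := Int.eq_ofNat_of_zero_le ha
  obtain ⟨b', rfl⟩ := Int.eq_ofNat_of_zero_le hb
  simp only [Int.natAbs_natCast]
  omega

-- Bézout identity computed by A's recursive euclides
theorem pvEuclidesBezout (a b : Int) :
    a * (pvEuclides a b).2.1 + b * (pvEuclides a b).2.2 = (pvEuclides a b).1 := by
  induction a, b using pvEuclides.induct with
  | case1 b => simp [pvEuclides]
  | case2 a b h ih =>
    rw [pvEuclides]
    simp only [h, dite_false]
    have hid := PySem.Int.floordiv_mul_add_mod b a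
    linear_combination ih - (pvEuclides (PySem.Int.mod b a) a).2.1 * hid

-- the gcd component of A's recursive euclides, on nonnegative arguments
theorem pvEuclidesGcd (a b : Int) : 0 ≤ a → 0 ≤ b → (pvEuclides a b).1 = (Int.gcd a b : Int) := by
  induction a, b using pvEuclides.induct with
  | case1 b =>
    intro _ hb
    simp [pvEuclides, Int.gcd, Int.natAbs_of_nonneg hb]
  | case2 a b h ih =>
    intro ha hb
    rw [pvEuclides]
    simp only [h, dite_false]
    have hapos : 0 < a := lt_of_le_of_ne ha (Ne.symm h)
    have hm : PySem.Int.mod b a = b % a := PySem.Int.mod_eq_emod_of_pos hapos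
    have h1 : 0 ≤ PySem.Int.mod b a := PySem.Int.mod_nonneg b hapos
    rw [ih h1 ha]
    congr 1
    rw [hm, Int.gcd, Int.gcd, pvNatAbsModOfNonneg a b ha hb]
    exact (Nat.gcd_rec a.natAbs b.natAbs).symm

-- the gcd component of B's iterative loop, on nonnegative arguments
theorem pvExtLoopGcd (oldr r olds s : Int) :
    0 ≤ oldr → 0 ≤ r → (pvExtLoop oldr r olds s).1 = (Int.gcd oldr r : Int) := by
  induction oldr, r, olds, s using pvExtLoop.induct with
  | case1 oldr olds s =>
    intro h1 _
    simp [pvExtLoop, Int.gcd, Int.natAbs_of_nonneg h1]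
  | case2 oldr r olds s h quot ih =>
    intro h1 h2
    rw [pvExtLoop]
    simp only [h, dite_false]
    have hrpos : 0 < r := lt_of_le_of_ne h2 (Ne.symm h)
    have hq : quot = PySem.Int.floordiv oldr r := rfl
    have hid := PySem.Int.floordiv_mul_add_mod oldr r
    have hm : oldr - PySem.Int.floordiv oldr r * r = PySem.Int.mod oldr r := by omega
    have hmn : 0 ≤ PySem.Int.mod oldr r := PySem.Int.mod_nonneg oldr hrpos
    rw [ih h2 (by rw [hq]; omega)]
    congr 1
    rw [hm, PySem.Int.mod_eq_emod_of_pos hrpos, Int.gcd, Int.gcd,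
        pvNatAbsModOfNonneg r oldr h2 h1]
    exact (Nat.gcd_comm _ _).trans (((Nat.gcd_rec _ _).symm).trans (Nat.gcd_comm _ _))

-- loop invariant of B: the gcd output stays congruent to e times the coefficient output
theorem pvExtLoopInv (e m : Int) (oldr r olds s : Int) :
    e * olds ≡ oldr [ZMOD m] → e * s ≡ r [ZMOD m] →
    e * (pvExtLoop oldr r olds s).2 ≡ (pvExtLoop oldr r olds s).1 [ZMOD m] := by
  induction oldr, r, olds, s using pvExtLoop.induct with
  | case1 oldr olds s =>
    intro h1 _
    simpa [pvExtLoop] using h1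
  | case2 oldr r olds s h quot ih =>
    intro h1 h2
    rw [pvExtLoop]
    simp only [h, dite_false]
    apply ih h2
    have heq : e * (olds - PySem.Int.floordiv oldr r * s)
        = e * olds - PySem.Int.floordiv oldr r * (e * s) := by ring
    rw [heq]
    exact h1.sub (h2.mul_left _)

-- modular cancellation by a unit
theorem pvCancel (c n a b : Int) (hg : Int.gcd c n = 1) (h : c * a ≡ c * b [ZMOD n]) :
    a ≡ b [ZMOD n] := by
  rw [Int.modEq_iff_dvd] at h ⊢
  have hd : n ∣ (b - a) * c := by
    have he : c * b - c * a = (b - a) * c := by ring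
    rwa [he] at h
  exact Int.dvd_of_dvd_mul_left_of_gcd_one hd (by rwa [Int.gcd_comm])

-- the two private exponents agree under Pre_
theorem pvExponentsAgree (t : Int) (ht : 0 < t) (hg : Int.gcd 65537 t = 1) :
    PySem.Int.mod (pvEuclides 65537 t).2.1 t = PySem.Int.mod (pvExtLoop 65537 t 1 0).2 t := by
  have hb := pvEuclidesBezout 65537 t
  have hga : (pvEuclides 65537 t).1 = (1 : Int) := by
    rw [pvEuclidesGcd 65537 t (by norm_num) ht.le, hg]; norm_num
  have hA : (65537 : Int) * (pvEuclides 65537 t).2.1 ≡ 1 [ZMOD t] := by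
    rw [Int.modEq_iff_dvd]
    exact ⟨(pvEuclides 65537 t).2.2, by rw [hga] at hb; linarith⟩
  have hgb : (pvExtLoop 65537 t 1 0).1 = (1 : Int) := by
    rw [pvExtLoopGcd 65537 t 1 0 (by norm_num) ht.le, hg]; norm_num
  have hB : (65537 : Int) * (pvExtLoop 65537 t 1 0).2 ≡ 1 [ZMOD t] := by
    have hi := pvExtLoopInv 65537 t 65537 t 1 0 (by simp [Int.ModEq])
      (by simp [Int.ModEq])
    rwa [hgb] at hi
  have hxy : (pvEuclides 65537 t).2.1 ≡ (pvExtLoop 65537 t 1 0).2 [ZMOD t] :=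
    pvCancel 65537 t _ _ hg (hA.trans hB.symm)
  rw [PySem.Int.mod_eq_emod_of_pos ht, PySem.Int.mod_eq_emod_of_pos ht]
  exact hxy

-- ===== VERDICT (by name: the statement is the Claim_ definition above) =====
theorem rsa_encrypt_decrypt_spec : Claim_equal_rsa_encrypt_decrypt := by
  intro p q message _ hpre
  obtain ⟨ht, hg, -⟩ := hpre
  unfold Spec_rsa_encrypt_decrypt rsa_encrypt_decrypt rsa_encrypt_decrypt_alt pvModInverse
  have hga : (pvEuclides 65537 ((p - 1) * (q - 1))).1 = (1 : Int) := by
    rw [pvEuclidesGcd 65537 _ (by norm_num) ht.le, hg]; norm_num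
  have hgb : (pvExtLoop 65537 ((p - 1) * (q - 1)) 1 0).1 = (1 : Int) := by
    rw [pvExtLoopGcd 65537 _ 1 0 (by norm_num) ht.le, hg]; norm_num
  have hd := pvExponentsAgree ((p - 1) * (q - 1)) ht hg
  simp only [hga, hgb, hd, ne_eq, not_true_eq_false, ite_false]
  simp [pvTextToAscii, pvAsciiToText, List.map_map, Function.comp_def]
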